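-- pv_equiv track=rewrite | github.com/AlifSrSE/ProblemSolves | 2067B-twoLargeBgas.py | solve
-- ===== SOURCE A (Python) =====
-- from collections import defaultdict
--
-- def solve(a):
--     value_to_count = defaultdict(int)
--     for ai in a:
--         value_to_count[ai] += 1
--
--     while value_to_count:
--         min_value = min(value_to_count.keys())
--         if value_to_count[min_value] == 1:
--             return False
--         if value_to_count[min_value] != 2:
--             value_to_count[min_value + 1] += value_to_count[min_value] - 2
--         del value_to_count[min_value]
--
--     return True
-- ===== SOURCE B (Python) =====
-- from itertools import groupby
--
--
-- def solve(a):
--     # sort once, run-length encode, then sweep ascending propagating the carry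
--     runs = [(v, len(list(g))) for v, g in groupby(sorted(a))]
--     i, cv, carry = 0, 0, 0
--     while i < len(runs) or carry:
--         if carry and (i == len(runs) or cv < runs[i][0]):
--             v, c = cv, carry
--         else:
--             v, c = runs[i]
--             if carry:  # here cv == runs[i][0]: the carry merges into this run
--                 c += carry
--             i += 1
--         if c == 1:
--             return False
--         carry, cv = c - 2, v + 1
--     return True
-- ===== Notes on version B (the rewrite author's own statement) =====
-- stated objective: alternative
-- what changed: Replaces the repeated min-over-all-dict-keys scan with dict mutation by one sort, a run-length encoding of the sorted list, and a single ascending sweep that propagates the carry to the next value.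
import Mathlib
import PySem

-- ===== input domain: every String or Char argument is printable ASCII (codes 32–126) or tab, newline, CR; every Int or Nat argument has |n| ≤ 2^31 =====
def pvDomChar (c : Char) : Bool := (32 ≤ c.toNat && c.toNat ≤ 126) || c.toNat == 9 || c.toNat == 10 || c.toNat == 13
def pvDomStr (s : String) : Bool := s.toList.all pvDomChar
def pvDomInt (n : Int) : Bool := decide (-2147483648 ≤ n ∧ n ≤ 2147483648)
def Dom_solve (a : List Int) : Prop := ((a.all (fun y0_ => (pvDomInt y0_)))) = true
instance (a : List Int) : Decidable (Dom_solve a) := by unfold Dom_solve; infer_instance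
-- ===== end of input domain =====

-- B replaces A's repeated min-over-dict-keys scan and dict mutation by one sort, a
-- run-length encoding, and a single ascending carry-propagating sweep (objective: alternative).

-- ===== PORT A =====
-- A's while loop, one fuel unit per iteration; fuel a.length + 1 always suffices because
-- every iteration lowers the total of the stored counts by 2.
def solveLoop : Nat → PySem.Dict Int Int → Bool
  | 0, _ => true
  | f+1, d =>
    if d.items.isEmpty then true                      -- while value_to_count:
    else
      match PySem.List.min? d.keys (fun k => k) with  -- min(value_to_count.keys())
      | none => true                                  -- unreachable: keys nonempty
      | some m =>
        if d.getD m 0 == 1 then false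
        else
          let d2 := if d.getD m 0 != 2
                    then d.modify (m+1) 0 (fun x => x + (d.getD m 0 - 2))
                    else d
          solveLoop f (d2.erase m)                    -- del value_to_count[min_value]

def solve (a : List Int) : Bool :=
  let value_to_count := a.foldl (fun d ai => d.modify ai 0 (· + 1)) PySem.Dict.empty
  solveLoop (a.length + 1) value_to_count

-- ===== PORT B =====
-- run-length encoding of the (sorted) list: port of the groupby comprehension, exact
def solveRunsAux (v c : Int) : List Int → List (Int × Int)
  | [] => [(v, c)]
  | y :: ys => if y == v then solveRunsAux v (c+1) ys else (v, c) :: solveRunsAux y 1 ys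

def solveRuns : List Int → List (Int × Int)
  | [] => []
  | x :: xs => solveRunsAux x 1 xs

-- the single ascending sweep (B's while loop; the remaining runs replace the index i)
def solveLoopB : Nat → List (Int × Int) → Int → Int → Bool
  | 0, _, _, _ => true
  | f+1, runs, cv, carry =>
    match runs with
    | [] =>
      if carry == 0 then true
      else if carry == 1 then false
      else solveLoopB f [] (cv+1) (carry-2)
    | (v, k) :: rest =>
      if carry != 0 && decide (cv < v) then
        if carry == 1 then false else solveLoopB f ((v,k)::rest) (cv+1) (carry-2)
      else
        let c := if carry != 0 then k + carry else k
        if c == 1 then false else solveLoopB f rest (v+1) (c-2)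

def solve_alt (a : List Int) : Bool :=
  solveLoopB (a.length + 1) (solveRuns (PySem.List.sorted a (fun x => x) false)) 0 0

-- ===== PRECONDITION & SPEC =====
def Spec_solve (a : List Int) (out : Bool) : Prop := out = solve_alt a
instance (a : List Int) (out : Bool) : Decidable (Spec_solve a out) := by unfold Spec_solve; infer_instance

-- ===== CLAIM (what is proved, stated in full; the proofs are below) =====
def Claim_equal_solve : Prop := ∀ (a : List Int), Dom_solve a → Spec_solve a (solve a)

-- ===== LEMMAS AND PROOFS =====

-- the abstract state A's dict and B's (runs, cv, carry) both represent: the carry merged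
-- into the runs (B merges it lazily when it reaches its run; A's dict already holds it)
def pvPush (cv x : Int) (t : List (Int × Int)) : List (Int × Int) :=
  if x = 0 then t else
    match t with
    | [] => [(cv, x)]
    | (v, k) :: rest => if v = cv then (v, k + x) :: rest else (cv, x) :: (v, k) :: rest

-- keys strictly increase along the abstract state
def pvInc (l : List (Int × Int)) : Prop := l.Pairwise (fun p q => p.1 < q.1)

lemma pv_find?_key {m c : Int} {l : List (Int × Int)}
    (hnd : (l.map Prod.fst).Nodup) (hin : (m, c) ∈ l) :
    l.find? (fun p => p.1 == m) = some (m, c) := by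
  induction l with
  | nil => simp at hin
  | cons p rest ih =>
    simp only [List.map_cons, List.nodup_cons] at hnd
    rcases List.mem_cons.mp hin with h | h
    · cases h; simp [List.find?]
    · have hne : p.1 ≠ m := by
        intro he
        exact hnd.1 (he ▸ List.mem_map_of_mem h)
      rw [List.find?_cons_of_neg (by simp [hne])]
      exact ih hnd.2 h

lemma pv_min?_eq {m : Int} {ks r : List Int} (h : ks.Perm (m :: r)) (hmin : ∀ y ∈ r, m < y) :
    PySem.List.min? ks (fun k => k) = some m := by
  have hne : ks ≠ [] := by
    intro h0; rw [h0] at h; simpa using h.length_eq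
  cases hmq : PySem.List.min? ks (fun k => k) with
  | none => exact absurd (((PySem.List.min?_eq_none_iff _ _).mp hmq)) hne
  | some x =>
    have hxm : x ∈ ks := PySem.List.min?_mem hmq
    have hmin' : ∀ y ∈ ks, x ≤ y := by simpa using PySem.List.min?_isMin hmq
    have hm_in : m ∈ ks := h.mem_iff.mpr (List.mem_cons_self)
    have hxle : x ≤ m := hmin' m hm_in
    rcases List.mem_cons.mp (h.mem_iff.mp hxm) with h1 | h1
    · rw [h1]
    · exact absurd hxle (not_le.mpr (hmin x h1))

lemma pv_keys_perm {m c : Int} {t : List (Int × Int)} (d : PySem.Dict Int Int)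
    (hperm : d.items.Perm ((m, c) :: t)) :
    d.keys.Perm (m :: t.map Prod.fst) := by
  simpa [PySem.Dict.keys] using hperm.map Prod.fst

lemma pv_inc_nodup {m c : Int} {t : List (Int × Int)} (hpw : pvInc ((m, c) :: t)) :
    ((m, c) :: t).map Prod.fst |>.Nodup := by
  rw [pvInc] at hpw
  exact (List.pairwise_map.mpr hpw).imp (fun h => ne_of_lt h)

lemma pv_getD_eq {m c : Int} {t : List (Int × Int)} (d : PySem.Dict Int Int)
    (hperm : d.items.Perm ((m, c) :: t)) (hpw : pvInc ((m, c) :: t)) :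
    d.getD m 0 = c := by
  have hnd : (d.items.map Prod.fst).Nodup :=
    ((pv_keys_perm d hperm).nodup_iff.mpr (by simpa using pv_inc_nodup hpw))
  have hin : (m, c) ∈ d.items := hperm.mem_iff.mpr (by simp)
  simp [PySem.Dict.getD, PySem.Dict.get?, pv_find?_key hnd hin]

lemma pv_push_inc {m c x : Int} {t : List (Int × Int)} (h : pvInc ((m, c) :: t)) :
    pvInc (pvPush (m+1) x t) := by
  rw [pvInc, List.pairwise_cons] at h
  obtain ⟨hhead, htail⟩ := h
  unfold pvPush
  split_ifs with hx
  · exact htail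
  · match t, hhead, htail with
    | [], _, _ => simp [pvInc]
    | (v, k) :: rest, hhead, htail =>
      rw [List.pairwise_cons] at htail
      obtain ⟨hv, hrest⟩ := htail
      by_cases hvm : v = m + 1
      · simp only [hvm, reduceIte]
        exact List.pairwise_cons.mpr ⟨by simpa [hvm] using hv, hrest⟩
      · simp only [if_neg hvm]
        refine List.pairwise_cons.mpr ⟨?_, List.pairwise_cons.mpr ⟨hv, hrest⟩⟩
        intro q hq
        have hmv : m < v := by simpa using hhead (v, k) (by simp)
        rcases List.mem_cons.mp hq with h1 | h1
        · rw [h1]; simp; omega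
        · have := hv q h1; simp at this ⊢; omega

lemma pv_erase_items (d : PySem.Dict Int Int) (m : Int) :
    (d.erase m).items = d.items.filter (fun p => !(p.1 == m)) := rfl

lemma pv_stepA {m c : Int} {t : List (Int × Int)} (f : Nat) (d : PySem.Dict Int Int)
    (hperm : d.items.Perm ((m, c) :: t)) (hpw : pvInc ((m, c) :: t)) :
    solveLoop (f+1) d =
      if c = 1 then false
      else solveLoop f ((if c ≠ 2 then d.modify (m+1) 0 (fun x => x + (c - 2)) else d).erase m) := by
  have hne : d.items ≠ [] := by
    intro h0; rw [h0] at hperm; simpa using hperm.length_eq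
  have hmin : PySem.List.min? d.keys (fun k => k) = some m := by
    refine pv_min?_eq (pv_keys_perm d hperm) ?_
    intro y hy
    rcases List.mem_map.mp hy with ⟨q, hq, rfl⟩
    rw [pvInc, List.pairwise_cons] at hpw
    exact hpw.1 q hq
  have hget : d.getD m 0 = c := pv_getD_eq d hperm hpw
  rw [solveLoop]
  rw [if_neg (by simpa using hne)]
  rw [hmin]
  show (if (d.getD m 0 == 1) = true then false
        else solveLoop f ((if (d.getD m 0 != 2) = true
              then d.modify (m + 1) 0 fun x => x + (d.getD m 0 - 2) else d).erase m)) = _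
  rw [hget]
  simp only [beq_iff_eq, bne_iff_ne]

lemma pv_stepA_items {m c : Int} {t : List (Int × Int)} (d : PySem.Dict Int Int)
    (hperm : d.items.Perm ((m, c) :: t)) (hpw : pvInc ((m, c) :: t)) :
    ((if c ≠ 2 then d.modify (m+1) 0 (fun x => x + (c - 2)) else d).erase m).items.Perm
      (pvPush (m+1) (c-2) t) := by
  have hkeylt : ∀ q ∈ t, m < q.1 := by
    rw [pvInc, List.pairwise_cons] at hpw
    exact fun q hq => hpw.1 q hq
  have hnd : (d.items.map Prod.fst).Nodup :=
    ((pv_keys_perm d hperm).nodup_iff.mpr (by simpa using pv_inc_nodup hpw))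
  have hfilrep : ∀ k2 : Int, ((m, k2) :: t).filter (fun p => !(p.1 == m)) = t := by
    intro k2
    rw [List.filter_cons_of_neg (by simp)]
    refine List.filter_eq_self.mpr ?_
    intro p hp
    have := hkeylt p hp
    simp
    omega
  by_cases hc2 : c = 2
  · subst hc2
    rw [if_neg (by simp), pv_erase_items]
    have hpush : pvPush (m+1) (2-2) t = t := by norm_num [pvPush]
    rw [hpush]
    exact (hfilrep 2) ▸ hperm.filter _
  · rw [if_pos hc2, PySem.Dict.modify]
    have hx0 : c - 2 ≠ 0 := by omega
    -- is m+1 a key of the abstract tail?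
    cases t with
    | nil =>
      -- m+1 is absent from d
      have hnotin : ∀ p ∈ d.items, ¬ (p.1 == (m+1)) = true := by
        intro p hp
        have hm1 : p ∈ [(m, c)] := hperm.mem_iff.mp hp
        simp at hm1
        subst hm1
        simp
      have hcon : d.contains (m+1) = false := by
        simp only [PySem.Dict.contains]
        exact List.any_eq_false.mpr hnotin
      have hget : d.getD (m+1) 0 = 0 := by
        simp [PySem.Dict.getD, PySem.Dict.get?, List.find?_eq_none.mpr hnotin]
      rw [hget, PySem.Dict.insert, hcon]
      simp only [Bool.false_eq_true, if_false]
      rw [pv_erase_items]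
      show ((d.items ++ [(m+1, 0 + (c-2))]).filter (fun p => !(p.1 == m))).Perm _
      simp only [zero_add]
      rw [List.filter_append]
      have h1 : [((m+1 : Int), c-2)].filter (fun p => !(p.1 == m)) = [(m+1, c-2)] := by
        simp
      rw [h1]
      have h2 : (d.items.filter (fun p => !(p.1 == m))).Perm [] := by
        have := hperm.filter (fun p => !(p.1 == m))
        rwa [hfilrep c] at this
      calc ((d.items.filter (fun p => !(p.1 == m))) ++ [(m+1, c-2)]).Perm
            ([] ++ [(m+1, c-2)]) := h2.append_right _
        _ = pvPush (m+1) (c-2) [] := by simp [pvPush, hx0]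
    | cons hd t' =>
      obtain ⟨v0, k0⟩ := hd
      have hv0gt : m < v0 := by simpa using hkeylt (v0, k0) (by simp)
      have ht'gt : ∀ q ∈ t', v0 < q.1 := by
        rw [pvInc, List.pairwise_cons] at hpw
        have := hpw.2
        rw [List.pairwise_cons] at this
        exact fun q hq => this.1 q hq
      by_cases hv0 : v0 = m + 1
      · -- m+1 IS the next key: in-place update
        subst hv0
        have hin2 : ((m+1 : Int), k0) ∈ d.items := hperm.mem_iff.mpr (by simp)
        have hget : d.getD (m+1) 0 = k0 := by
          simp [PySem.Dict.getD, PySem.Dict.get?, pv_find?_key hnd hin2]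
        have hcon : d.contains (m+1) = true := by
          simp only [PySem.Dict.contains]
          exact List.any_eq_true.mpr ⟨(m+1, k0), hin2, by simp⟩
        rw [hget, PySem.Dict.insert, hcon]
        simp only [if_true]
        rw [pv_erase_items]
        set g := fun p : Int × Int => if (p.1 == m+1) = true then ((m+1 : Int), k0 + (c-2)) else p with hg
        show ((d.items.map g).filter (fun p => !(p.1 == m))).Perm _
        have hmaprep : ((m, c) :: (m+1, k0) :: t').map g = (m, c) :: (m+1, k0 + (c-2)) :: t' := by
          simp only [List.map_cons]
          congr 1
          · simp [hg]
          congr 1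
          · simp [hg]
          · rw [show t'.map g = t'.map id from List.map_congr_left ?_, List.map_id]
            intro p hp
            have := ht'gt p hp
            simp [hg]
            omega
        have hperm2 : (d.items.map g).Perm ((m, c) :: (m+1, k0 + (c-2)) :: t') := by
          rw [← hmaprep]
          exact hperm.map g
        have := hperm2.filter (fun p => !(p.1 == m))
        rw [List.filter_cons_of_neg (by simp)] at this
        have hkeep : ((m+1, k0 + (c-2)) :: t').filter (fun p => !(p.1 == m)) =
            (m+1, k0 + (c-2)) :: t' := by
          refine List.filter_eq_self.mpr ?_
          intro p hp
          rcases List.mem_cons.mp hp with h1 | h1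
          · rw [h1]; simp
          · have := ht'gt p h1; simp; omega
        rw [hkeep] at this
        have hpush : pvPush (m+1) (c-2) ((m+1, k0) :: t') = (m+1, k0 + (c-2)) :: t' := by
          simp [pvPush, hx0]
        rw [hpush]
        exact this
      · -- m+1 absent: append then move to front
        have hkeyne : ∀ p ∈ d.items, ¬ (p.1 == (m+1)) = true := by
          intro p hp
          have hpm : p ∈ (m, c) :: (v0, k0) :: t' := hperm.mem_iff.mp hp
          simp only [beq_iff_eq]
          rcases List.mem_cons.mp hpm with h1 | h1
          · rw [h1]; simp
          rcases List.mem_cons.mp h1 with h2 | h2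
          · rw [h2]; simpa using hv0
          · have h3 := ht'gt p h2
            intro he
            rw [he] at h3
            omega
        have hcon : d.contains (m+1) = false := by
          simp only [PySem.Dict.contains]
          exact List.any_eq_false.mpr hkeyne
        have hget : d.getD (m+1) 0 = 0 := by
          simp [PySem.Dict.getD, PySem.Dict.get?, List.find?_eq_none.mpr hkeyne]
        rw [hget, PySem.Dict.insert, hcon]
        simp only [Bool.false_eq_true, if_false]
        rw [pv_erase_items]
        show ((d.items ++ [(m+1, 0 + (c-2))]).filter (fun p => !(p.1 == m))).Perm _
        simp only [zero_add]
        rw [List.filter_append]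
        have h1 : [((m+1 : Int), c-2)].filter (fun p => !(p.1 == m)) =
            [(m+1, c-2)] := by simp
        rw [h1]
        have h2 := hperm.filter (fun p => !(p.1 == m))
        rw [hfilrep c] at h2
        have hpush : pvPush (m+1) (c-2) ((v0, k0) :: t') =
            (m+1, c-2) :: (v0, k0) :: t' := by
          rw [pvPush.eq_def, if_neg hx0]
          simp [hv0]
        rw [hpush]
        exact (h2.append_right _).trans (List.perm_append_singleton _ _)

lemma pv_stepB {m c cv carry : Int} {runs t : List (Int × Int)} (f : Nat)
    (h : pvPush cv carry runs = (m, c) :: t) (hpw : pvInc ((m, c) :: t)) :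
    solveLoopB (f+1) runs cv carry =
      if c = 1 then false else solveLoopB f t (m+1) (c-2) := by
  by_cases hc0 : carry = 0
  · subst hc0
    simp only [pvPush, reduceIte] at h
    subst h
    show solveLoopB (f+1) ((m,c)::t) cv 0 = _
    simp [solveLoopB]
  · rw [pvPush.eq_def, if_neg hc0] at h
    split at h
    · -- runs = []
      simp only [List.cons.injEq, Prod.mk.injEq] at h
      obtain ⟨⟨h1, h2⟩, h3⟩ := h
      subst h1; subst h2; subst h3
      simp [solveLoopB, hc0]
    · rename_i v k rest
      split at h
      · rename_i hv
        simp only [List.cons.injEq, Prod.mk.injEq] at h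
        obtain ⟨⟨h1, h2⟩, h3⟩ := h
        subst h3
        show solveLoopB (f+1) ((v,k)::rest) cv carry = _
        rw [solveLoopB]
        rw [if_neg (by simp [hv])]
        simp only [bne_iff_ne, ne_eq, hc0, not_false_eq_true, if_pos]
        simp [← h1, ← h2, hv]
      · rename_i hv
        simp only [List.cons.injEq, Prod.mk.injEq] at h
        obtain ⟨⟨h1, h2⟩, h3⟩ := h
        subst h1; subst h2; subst h3
        have hlt : cv < v := by
          rw [pvInc, List.pairwise_cons] at hpw
          simpa using hpw.1 (v, k) (by simp)
        show solveLoopB (f+1) ((v,k)::rest) cv carry = _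
        rw [solveLoopB]
        rw [if_pos (by simp [hc0, hlt])]
        simp

lemma pv_runsAux_eq {v : Int} (c : Int) (ys : List Int) (hs : ys.Pairwise (· ≤ ·))
    (hv : ∀ y ∈ ys, v ≤ y) :
    solveRunsAux v c ys = (v, c + (ys.count v : Int)) :: solveRuns (ys.filter (fun y => y ≠ v)) := by
  induction ys generalizing v c with
  | nil => simp [solveRunsAux, solveRuns]
  | cons y t ih =>
    rw [List.pairwise_cons] at hs
    obtain ⟨hy, ht⟩ := hs
    by_cases hyv : y = v
    · subst hyv
      rw [solveRunsAux, if_pos (by simp)]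
      rw [ih (c+1) ht (fun z hz => hy z hz)]
      simp
      ring
    · have hvy : v < y := lt_of_le_of_ne (hv y (by simp)) (Ne.symm hyv)
      have hcnt : (y :: t).count v = 0 := by
        refine List.count_eq_zero.mpr ?_
        intro hmem
        rcases List.mem_cons.mp hmem with h1 | h1
        · omega
        · have := hy v h1; omega
      have hfil : (y :: t).filter (fun z => z ≠ v) = y :: t := by
        refine List.filter_eq_self.mpr ?_
        intro z hz
        rcases List.mem_cons.mp hz with h1 | h1
        · simp [h1]; omega
        · have := hy z h1; simp; omega
      rw [solveRunsAux, if_neg (by simpa using hyv)]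
      rw [hcnt, hfil]
      simp [solveRuns]

lemma pv_runs_props (n : Nat) : ∀ (l : List Int), l.length ≤ n → l.Pairwise (· ≤ ·) →
    pvInc (solveRuns l) ∧
    (∀ p ∈ solveRuns l, p.2 = (l.count p.1 : Int) ∧ p.1 ∈ l) ∧
    (∀ x ∈ l, (x, (l.count x : Int)) ∈ solveRuns l) := by
  induction n with
  | zero =>
    intro l hl _
    have : l = [] := List.eq_nil_of_length_eq_zero (Nat.le_zero.mp hl)
    subst this
    simp [solveRuns, pvInc]
  | succ n ih =>
    intro l hl hp
    match l with
    | [] => simp [solveRuns, pvInc]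
    | x :: xs =>
      rw [List.pairwise_cons] at hp
      obtain ⟨hx, hxs⟩ := hp
      have hrw : solveRuns (x :: xs) = (x, ((x :: xs).count x : Int)) ::
          solveRuns (xs.filter (fun y => y ≠ x)) := by
        rw [solveRuns, pv_runsAux_eq 1 xs hxs hx]
        simp
        ring
      set l' := xs.filter (fun y => y ≠ x) with hl'
      have hlen : l'.length ≤ n := by
        have h1 : l'.length ≤ xs.length := List.length_filter_le _ _
        simp at hl
        omega
      have hp' : l'.Pairwise (· ≤ ·) := List.Pairwise.filter _ hxs
      have hmem' : ∀ z ∈ l', x < z := by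
        intro z hz
        have hz' := List.of_mem_filter hz
        have hzz : z ∈ xs := List.mem_of_mem_filter hz
        have := hx z hzz
        simp at hz'
        omega
      have hcnt' : ∀ z, z ≠ x → l'.count z = xs.count z := by
        intro z hzx
        rw [hl', List.count_filter]
        simp [hzx]
      obtain ⟨ih1, ih2, ih3⟩ := ih l' hlen hp'
      refine ⟨?_, ?_, ?_⟩
      · rw [hrw, pvInc, List.pairwise_cons]
        refine ⟨?_, ih1⟩
        intro q hq
        exact hmem' q.1 (ih2 q hq).2
      · rw [hrw]
        intro p hp
        rcases List.mem_cons.mp hp with h1 | h1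
        · subst h1; simp
        · obtain ⟨hc, hm⟩ := ih2 p h1
          have hpx : p.1 ≠ x := by have := hmem' p.1 hm; omega
          refine ⟨?_, ?_⟩
          · rw [hc, hcnt' p.1 hpx]
            have hxp : ¬ (x = p.1) := fun h => hpx h.symm
            simp [hxp]
          · exact List.mem_cons_of_mem _ (List.mem_of_mem_filter hm)
      · intro z hz
        rw [hrw]
        by_cases hzx : z = x
        · subst hzx; simp
        · have hzxs : z ∈ xs := by
            rcases List.mem_cons.mp hz with h1 | h1
            · exact absurd h1 hzx
            · exact h1
          have hzl' : z ∈ l' := by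
            rw [hl']
            exact List.mem_filter.mpr ⟨hzxs, by simp [hzx]⟩
          have := ih3 z hzl'
          rw [hcnt' z hzx] at this
          refine List.mem_cons_of_mem _ ?_
          have hxz : ¬ (x = z) := fun h => hzx h.symm
          simpa [List.count_cons, hxz] using this

lemma pv_sorted_pw (a : List Int) :
    (PySem.List.sorted a (fun x => x) false).Pairwise (· ≤ ·) := by
  simpa using PySem.List.sorted_pairwise a (fun x => x)

lemma pv_init_inc (a : List Int) : pvInc (solveRuns (PySem.List.sorted a (fun x => x) false)) := by
  exact (pv_runs_props _ _ le_rfl (pv_sorted_pw a)).1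

lemma pv_init_perm (a : List Int) :
    (a.foldl (fun d ai => d.modify ai 0 (· + 1)) PySem.Dict.empty).items.Perm
      (solveRuns (PySem.List.sorted a (fun x => x) false)) := by
  have hco : (a.foldl (fun d ai => d.modify ai 0 (· + 1)) PySem.Dict.empty) = PySem.Dict.counter a := rfl
  rw [hco, PySem.Dict.items_counter]
  set s := PySem.List.sorted a (fun x => x) false with hs
  obtain ⟨hinc, h2, h3⟩ := pv_runs_props s.length s le_rfl (pv_sorted_pw a)
  have hperm : s.Perm a := PySem.List.sorted_perm a (fun x => x) false
  -- both sides Nodup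
  have hnd1 : ((PySem.Set.ofList a).map (fun k => (k, (a.count k : Int)))).Nodup := by
    refine List.Nodup.map ?_ (PySem.Set.nodup_ofList a)
    intro x y hxy
    simpa using congrArg Prod.fst hxy
  have hnd2 : (solveRuns s).Nodup := by
    have : ((solveRuns s).map Prod.fst).Nodup := by
      have := hinc
      rw [pvInc] at this
      exact (List.pairwise_map.mpr this).imp (fun h => ne_of_lt h)
    exact this.of_map
  rw [List.perm_ext_iff_of_nodup hnd1 hnd2]
  rintro ⟨k, c⟩
  constructor
  · intro hmem
    rcases List.mem_map.mp hmem with ⟨k', hk', heq⟩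
    rw [Prod.mk.injEq] at heq
    obtain ⟨h1, h2'⟩ := heq
    subst h1
    have hka : k' ∈ a := (PySem.Set.mem_ofList _ _).mp hk'
    have hks : k' ∈ s := hperm.mem_iff.mpr hka
    have h4 := h3 k' hks
    have hcnt : s.count k' = a.count k' := hperm.count_eq k'
    rw [hcnt] at h4
    rwa [← h2']
  · intro hmem
    obtain ⟨hc, hk⟩ := h2 _ hmem
    refine List.mem_map.mpr ⟨k, ?_, ?_⟩
    · exact (PySem.Set.mem_ofList _ _).mpr (hperm.mem_iff.mp hk)
    · have : s.count k = a.count k := hperm.count_eq k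
      simp at hc
      simp [hc, this]

lemma pv_loop_eq (f : Nat) : ∀ (runs : List (Int × Int)) (cv carry : Int)
    (d : PySem.Dict Int Int),
    d.items.Perm (pvPush cv carry runs) → pvInc (pvPush cv carry runs) →
    solveLoop f d = solveLoopB f runs cv carry := by
  induction f with
  | zero => intro runs cv carry d _ _; rfl
  | succ f ih =>
    intro runs cv carry d hperm hinc
    rcases hrep : pvPush cv carry runs with _ | ⟨⟨m, c⟩, t⟩
    · -- empty abstract state: both loops stop
      rw [hrep] at hperm
      have hitems : d.items = [] := by
        have := hperm.length_eq
        simpa using this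
      have hcr : carry = 0 ∧ runs = [] := by
        by_cases hc0 : carry = 0
        · refine ⟨hc0, ?_⟩
          rw [pvPush.eq_def, if_pos hc0] at hrep
          exact hrep
        · exfalso
          rw [pvPush.eq_def, if_neg hc0] at hrep
          split at hrep
          · simp at hrep
          · split at hrep <;> simp at hrep
      obtain ⟨hc0, hruns⟩ := hcr
      subst hc0; subst hruns
      rw [solveLoop]
      rw [if_pos (by simp [hitems])]
      simp [solveLoopB]
    · rw [hrep] at hperm hinc
      rw [pv_stepA f d hperm hinc, pv_stepB f hrep hinc]
      by_cases hc1 : c = 1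
      · simp [hc1]
      · rw [if_neg hc1, if_neg hc1]
        exact ih t (m+1) (c-2) _ (pv_stepA_items d hperm hinc) (pv_push_inc hinc)

-- ===== VERDICT (by name: the statement is the Claim_ definition above) =====
theorem solve_spec : Claim_equal_solve := by
  intro a _
  show solve a = solve_alt a
  unfold solve solve_alt
  exact pv_loop_eq (a.length + 1) _ 0 0 _ (by simpa [pvPush] using pv_init_perm a)
    (by simpa [pvPush] using pv_init_inc a)
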